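-- pv_equiv track=rewrite | github.com/Joshhh0908/CAD_diagnosis-master | visualisation.py | get_labeled_segments
-- ===== SOURCE A (Python) =====
-- BG_IDX = 6  # background is last index in model output space
--
-- def get_labeled_segments(label_array):
--     """Contiguous runs of SAME non-background label -> list of (start, end, label)."""
--     segments, in_seg, current_label, start = [], False, 0, BG_IDX
--     for i, v in enumerate(label_array):
--         v = int(v)
--         if v != BG_IDX and not in_seg:
--             start, in_seg, current_label = i, True, v
--         elif v != BG_IDX and in_seg and v != current_label:
--             segments.append((start, i - 1, current_label))
--             start, current_label = i, v
--         elif v == BG_IDX and in_seg: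
--             segments.append((start, i - 1, current_label))
--             in_seg = False
--     if in_seg:
--         segments.append((start, len(label_array) - 1, current_label))
--     return segments
-- ===== SOURCE B (Python) =====
-- BG_IDX = 6  # background is last index in model output space
--
-- def get_labeled_segments(label_array):
--     """Contiguous runs of SAME non-background label -> list of (start, end, label)."""
--     vals = [int(v) for v in label_array]
--     segments = []
--     i, n = 0, len(vals)
--     while i < n:
--         v = vals[i]
--         j = i + 1
--         while j < n and vals[j] == v:
--             j += 1
--         if v != BG_IDX:
--             segments.append((i, j - 1, v))
--         i = j
--     return segments
-- ===== Notes on version B (the rewrite author's own statement) =====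
-- stated objective: idiomatic
-- what changed: Replaces A's in_seg/current_label/start state machine over enumerate with a two-pointer group-then-emit scan: find each maximal run [i, j) of equal values at once and emit (i, j-1, v) directly for non-background runs.
import Mathlib
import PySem

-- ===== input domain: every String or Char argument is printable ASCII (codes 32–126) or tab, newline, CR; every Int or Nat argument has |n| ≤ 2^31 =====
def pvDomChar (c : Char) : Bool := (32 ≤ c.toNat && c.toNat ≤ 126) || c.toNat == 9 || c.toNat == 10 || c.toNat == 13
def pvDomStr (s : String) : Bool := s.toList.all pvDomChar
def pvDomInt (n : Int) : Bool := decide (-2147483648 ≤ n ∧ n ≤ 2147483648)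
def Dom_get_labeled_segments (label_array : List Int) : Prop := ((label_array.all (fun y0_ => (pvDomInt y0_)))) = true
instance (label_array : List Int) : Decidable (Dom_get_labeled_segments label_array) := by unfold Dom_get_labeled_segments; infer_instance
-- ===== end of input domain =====

-- ===== PORT A =====
-- B changes the decomposition: a two-pointer group-then-emit scan instead of A's in_seg/current_label state machine (same O(n) cost).
def pvStepA (i v : Int) (st : List (Int × Int × Int) × Bool × Int × Int) :
    List (Int × Int × Int) × Bool × Int × Int :=
  let (segments, in_seg, current_label, start) := st
  if v ≠ 6 ∧ in_seg = false then
    (segments, true, v, i)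
  else if v ≠ 6 ∧ in_seg = true ∧ v ≠ current_label then
    (segments ++ [(start, i - 1, current_label)], true, v, i)
  else if v = 6 ∧ in_seg = true then
    (segments ++ [(start, i - 1, current_label)], false, current_label, start)
  else
    (segments, in_seg, current_label, start)

def pvLoopA : List Int → Int → (List (Int × Int × Int) × Bool × Int × Int) →
    List (Int × Int × Int) × Bool × Int × Int
  | [], _, st => st
  | v :: rest, i, st => pvLoopA rest (i + 1) (pvStepA i v st)

def pvFinishA (n : Int) (st : List (Int × Int × Int) × Bool × Int × Int) :
    List (Int × Int × Int) :=
  if st.2.1 then st.1 ++ [(st.2.2.2, n - 1, st.2.2.1)] else st.1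

def get_labeled_segments (label_array : List Int) : List (Int × Int × Int) :=
  pvFinishA (label_array.length : Int) (pvLoopA label_array 0 ([], false, 0, 6))

-- ===== PORT B =====
-- the inner `while vals[j] == v` scan of Source B is the takeWhile/dropWhile split of the run
def pvRunsB (idx : Int) : List Int → List (Int × Int × Int)
  | [] => []
  | v :: rest =>
    let run := rest.takeWhile (fun x => x == v)
    let len : Int := 1 + (run.length : Int)
    (if v ≠ 6 then [(idx, idx + len - 1, v)] else []) ++
      pvRunsB (idx + len) (rest.dropWhile (fun x => x == v))
  termination_by xs => xs.length
  decreasing_by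
    simpa using Nat.lt_succ_of_le (List.length_dropWhile_le _ _)

def get_labeled_segments_alt (label_array : List Int) : List (Int × Int × Int) :=
  pvRunsB 0 label_array

-- ===== PRECONDITION & SPEC =====
def Spec_get_labeled_segments (label_array : List Int) (out : List (Int × Int × Int)) : Prop := out = get_labeled_segments_alt label_array
instance (label_array : List Int) (out : List (Int × Int × Int)) : Decidable (Spec_get_labeled_segments label_array out) := by unfold Spec_get_labeled_segments; infer_instance

-- ===== CLAIM (what is proved, stated in full; the proofs are below) =====
def Claim_equal_get_labeled_segments : Prop := ∀ (label_array : List Int), Dom_get_labeled_segments label_array → Spec_get_labeled_segments label_array (get_labeled_segments label_array)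

-- ===== LEMMAS AND PROOFS =====

lemma pvRunsB_six (i : Int) (rest : List Int) :
    pvRunsB i (6 :: rest) = pvRunsB (i + 1) rest := by
  match rest with
  | [] => simp [pvRunsB]
  | r :: r' =>
    by_cases h : r = 6
    · subst h
      rw [pvRunsB, pvRunsB]
      simp [List.takeWhile, List.dropWhile]
      ring_nf
    · rw [pvRunsB]
      have hb : (r == (6 : Int)) = false := by simp [h]
      simp [List.takeWhile, List.dropWhile, hb]

lemma pvMain (xs : List Int) : ∀ (i0 : Int) (segs : List (Int × Int × Int)) (c s : Int),
    (pvFinishA (i0 + (xs.length : Int)) (pvLoopA xs i0 (segs, false, c, s)) =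
      segs ++ pvRunsB i0 xs) ∧
    (c ≠ 6 → pvFinishA (i0 + (xs.length : Int)) (pvLoopA xs i0 (segs, true, c, s)) =
      segs ++ [(s, i0 + ((xs.takeWhile (fun x => x == c)).length : Int) - 1, c)] ++
        pvRunsB (i0 + ((xs.takeWhile (fun x => x == c)).length : Int))
          (xs.dropWhile (fun x => x == c))) := by
  induction xs with
  | nil =>
    intro i0 segs c s
    constructor
    · simp [pvLoopA, pvFinishA, pvRunsB]
    · intro _
      simp [pvLoopA, pvFinishA, pvRunsB]
  | cons v rest ih =>
    intro i0 segs c s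
    constructor
    · by_cases hv : v = 6
      · subst hv
        rw [pvLoopA]
        have hstep : pvStepA i0 6 (segs, false, c, s) = (segs, false, c, s) := by
          simp [pvStepA]
        rw [hstep]
        have := (ih (i0 + 1) segs c s).1
        rw [pvRunsB_six]
        rw [← this]
        congr 1
        push_cast [List.length_cons]
        ring
      · rw [pvLoopA]
        have hstep : pvStepA i0 v (segs, false, c, s) = (segs, true, v, i0) := by
          simp [pvStepA, hv]
        rw [hstep]
        have h2 := (ih (i0 + 1) segs v i0).2 hv
        have hlen : i0 + ((v :: rest).length : Int) = i0 + 1 + (rest.length : Int) := by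
          push_cast [List.length_cons]; ring
        rw [hlen, h2]
        rw [pvRunsB]
        simp only [hv, if_pos, ne_eq, not_false_iff]
        have : i0 + 1 + ((rest.takeWhile (fun x => x == v)).length : Int) =
            i0 + (1 + ((rest.takeWhile (fun x => x == v)).length : Int)) := by ring
        rw [this]
        simp [List.append_assoc]
    · intro hc
      by_cases hv : v = c
      · subst hv
        have hv6 : v ≠ 6 := hc
        rw [pvLoopA]
        have hstep : pvStepA i0 v (segs, true, v, s) = (segs, true, v, s) := by
          simp [pvStepA, hv6]
        rw [hstep]
        have h2 := (ih (i0 + 1) segs v s).2 hc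
        have hlen : i0 + ((v :: rest).length : Int) = i0 + 1 + (rest.length : Int) := by
          push_cast [List.length_cons]; ring
        rw [hlen, h2]
        have htw : (v :: rest).takeWhile (fun x => x == v) =
            v :: rest.takeWhile (fun x => x == v) := by
          simp [List.takeWhile]
        have hdw : (v :: rest).dropWhile (fun x => x == v) =
            rest.dropWhile (fun x => x == v) := by
          simp [List.dropWhile]
        rw [htw, hdw]
        push_cast [List.length_cons]
        rw [show i0 + 1 + ((rest.takeWhile (fun x => x == v)).length : Int) =
            i0 + (((rest.takeWhile (fun x => x == v)).length : Int) + 1) from by ring]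
      · have hne : (v == c) = false := by simp [hv]
        have htw : (v :: rest).takeWhile (fun x => x == c) = [] := by
          simp [List.takeWhile, hne]
        have hdw : (v :: rest).dropWhile (fun x => x == c) = v :: rest := by
          simp [List.dropWhile, hne]
        rw [htw, hdw]
        by_cases hv6 : v = 6
        · subst hv6
          rw [pvLoopA]
          have hstep : pvStepA i0 6 (segs, true, c, s) =
              (segs ++ [(s, i0 - 1, c)], false, c, s) := by
            simp [pvStepA, Ne.symm hc]
          rw [hstep]
          have h1 := (ih (i0 + 1) (segs ++ [(s, i0 - 1, c)]) c s).1
          have hlen : i0 + (((6 : Int) :: rest).length : Int) = i0 + 1 + (rest.length : Int) := by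
            push_cast [List.length_cons]; ring
          rw [hlen, h1, pvRunsB_six]
          simp
        · rw [pvLoopA]
          have hstep : pvStepA i0 v (segs, true, c, s) =
              (segs ++ [(s, i0 - 1, c)], true, v, i0) := by
            simp [pvStepA, hv6, hv]
          rw [hstep]
          have h2 := (ih (i0 + 1) (segs ++ [(s, i0 - 1, c)]) v i0).2 hv6
          have hlen : i0 + ((v :: rest).length : Int) = i0 + 1 + (rest.length : Int) := by
            push_cast [List.length_cons]; ring
          rw [hlen, h2]
          rw [pvRunsB]
          simp only [hv6, if_pos, ne_eq, not_false_iff]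
          rw [show i0 + 1 + ((rest.takeWhile (fun x => x == v)).length : Int) =
              i0 + (1 + ((rest.takeWhile (fun x => x == v)).length : Int)) from by ring]
          simp [List.append_assoc]

-- ===== VERDICT (by name: the statement is the Claim_ definition above) =====
theorem get_labeled_segments_spec : Claim_equal_get_labeled_segments := by
  intro label_array _
  unfold Spec_get_labeled_segments get_labeled_segments get_labeled_segments_alt
  have := (pvMain label_array 0 [] 0 6).1
  simpa using this
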